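-- pv_equiv track=rewrite | github.com/raeez/chiral-bar-cobar | compute/lib/c334_c444_arithmetic_engine.py | squarefree_kernel_int
-- ===== SOURCE A (Python) =====
-- def squarefree_kernel_int(n: int) -> int:
--     """Squarefree part of |n|."""
--     if n == 0:
--         return 0
--     n = abs(n)
--     out = 1
--     p = 2
--     while p * p <= n:
--         e = 0
--         while n % p == 0:
--             n //= p
--             e += 1
--         if e % 2 == 1:
--             out *= p
--         p += 1
--     if n > 1:
--         out *= n
--     return out
-- ===== SOURCE B (Python) =====
-- def squarefree_kernel_int(n: int) -> int:
--     """Squarefree part of |n|: repeatedly divide out square divisors; what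
--     remains has no square divisor > 1, hence is the squarefree part."""
--     m = abs(n)
--     if m == 0:
--         return 0
--     d = 2
--     while d * d <= m:
--         if m % (d * d) == 0:
--             m //= d * d
--         else:
--             d += 1
--     return m
-- ===== Notes on version B (the rewrite author's own statement) =====
-- stated objective: alternative
-- what changed: A does trial division by every p, counting each exponent and multiplying odd-exponent primes into an accumulator; B instead keeps a single value and repeatedly divides out any square divisor d*d until none of size <= m remains, which leaves exactly the squarefree part.
import Mathlib
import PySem

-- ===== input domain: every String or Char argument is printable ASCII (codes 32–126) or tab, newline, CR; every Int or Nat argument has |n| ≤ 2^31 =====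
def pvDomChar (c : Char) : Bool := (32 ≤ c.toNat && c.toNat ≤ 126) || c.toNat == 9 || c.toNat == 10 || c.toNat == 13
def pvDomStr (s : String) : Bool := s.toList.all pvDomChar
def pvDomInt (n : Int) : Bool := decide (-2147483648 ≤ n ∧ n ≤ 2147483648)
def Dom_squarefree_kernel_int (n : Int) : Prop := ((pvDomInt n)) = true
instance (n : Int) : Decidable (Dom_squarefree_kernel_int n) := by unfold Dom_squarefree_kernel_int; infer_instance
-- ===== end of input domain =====

-- B replaces A's trial division with exponent-parity bookkeeping by a single loop that
-- repeatedly divides out square divisors d*d; objective: alternative (same asymptotic cost).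

-- ===== PORT A =====
-- After 'n = abs(n)' all of A's values are nonnegative, so the port works on Nat, where
-- Python's '//' and '%' coincide with Nat division/remainder exactly.

-- inner loop 'while n % p == 0: n //= p; e += 1'; the '1 ≤ n ∧ 2 ≤ p' part of the guard
-- only makes the recursion total (it always holds at A's call sites, where n ≥ 1, p ≥ 2).
def stripA (n p : Nat) : Nat × Nat :=
  if h : 1 ≤ n ∧ 2 ≤ p ∧ n % p = 0 then
    let r := stripA (n / p) p
    (r.1, r.2 + 1)
  else (n, 0)
termination_by n
decreasing_by exact Nat.div_lt_self h.1 h.2.1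

-- (stripA n p).1 ≤ n : needed by loopA's termination measure
theorem stripA_fst_le (n p : Nat) : (stripA n p).1 ≤ n := by
  fun_induction stripA n p with
  | case1 n h r ih =>
    show (stripA (n / p) p).1 ≤ n
    exact le_trans ih (Nat.div_le_self n p)
  | case2 n h => simp

-- outer loop 'while p * p <= n: …; p += 1' plus the trailing 'if n > 1: out *= n';
-- the '2 ≤ p' part of the guard only makes the recursion total (always true from p = 2 on).
def loopA (n out p : Nat) : Nat :=
  if h : 2 ≤ p ∧ p * p ≤ n then
    let r := stripA n p
    loopA r.1 (if r.2 % 2 = 1 then out * p else out) (p + 1)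
  else if 1 < n then out * n else out
termination_by n + 1 - p
decreasing_by
  have h1 := stripA_fst_le n p
  have h2 : p ≤ p * p := Nat.le_mul_of_pos_left p (by omega)
  omega

def squarefree_kernel_int (n : Int) : Int :=
  if n = 0 then 0 else ((loopA n.natAbs 1 2 : Nat) : Int)

-- ===== PORT B =====
-- 'while d * d <= m: if m % (d*d) == 0: m //= d*d else: d += 1'; the '2 ≤ d' part of the
-- guard only makes the recursion total (always true from d = 2 on).
def bLoop (m d : Nat) : Nat :=
  if h : 2 ≤ d ∧ d * d ≤ m then
    if m % (d * d) = 0 then bLoop (m / (d * d)) d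
    else bLoop m (d + 1)
  else m
termination_by (m, m - d)
decreasing_by
  · have h4 : 2 * d ≤ d * d := Nat.mul_le_mul_right d h.1
    exact Prod.Lex.left _ _ (Nat.div_lt_self (by omega) (by omega))
  · have h4 : 2 * d ≤ d * d := Nat.mul_le_mul_right d h.1
    exact Prod.Lex.right m (by omega)

def squarefree_kernel_int_alt (n : Int) : Int :=
  if n.natAbs = 0 then 0 else ((bLoop n.natAbs 2 : Nat) : Int)

-- ===== PRECONDITION & SPEC =====
def Spec_squarefree_kernel_int (n : Int) (out : Int) : Prop := out = squarefree_kernel_int_alt n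
instance (n : Int) (out : Int) : Decidable (Spec_squarefree_kernel_int n out) := by unfold Spec_squarefree_kernel_int; infer_instance

-- ===== CLAIM (what is proved, stated in full; the proofs are below) =====
def Claim_equal_squarefree_kernel_int : Prop := ∀ (n : Int), Dom_squarefree_kernel_int n → Spec_squarefree_kernel_int n (squarefree_kernel_int n)

-- ===== LEMMAS AND PROOFS =====

-- Uniqueness of the squarefree part: if r * k² = r' * k'² with r, r' squarefree, then r = r'.
theorem sqf_unique {r k r' k' : Nat} (hr : Squarefree r) (hr' : Squarefree r')
    (h : r * k ^ 2 = r' * k' ^ 2) (hk : k ≠ 0) (hk' : k' ≠ 0) : r = r' := by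
  have hrz : r ≠ 0 := hr.ne_zero
  have hrz' : r' ≠ 0 := hr'.ne_zero
  apply Nat.factorization_inj hrz hrz'
  ext p
  have e1 : (r * k ^ 2).factorization p = r.factorization p + 2 * k.factorization p := by
    rw [Nat.factorization_mul hrz (pow_ne_zero 2 hk), Nat.factorization_pow]
    simp [two_mul, mul_comm]
  have e2 : (r' * k' ^ 2).factorization p = r'.factorization p + 2 * k'.factorization p := by
    rw [Nat.factorization_mul hrz' (pow_ne_zero 2 hk'), Nat.factorization_pow]
    simp [two_mul, mul_comm]
  have b1 : r.factorization p ≤ 1 := (Nat.squarefree_iff_factorization_le_one hrz).mp hr p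
  have b2 : r'.factorization p ≤ 1 := (Nat.squarefree_iff_factorization_le_one hrz').mp hr' p
  rw [h] at e1
  omega

-- stripA really strips the full power of p
theorem stripA_spec (n p : Nat) : 1 ≤ n → 2 ≤ p →
    n = (stripA n p).1 * p ^ (stripA n p).2 ∧ ¬ p ∣ (stripA n p).1 ∧ 1 ≤ (stripA n p).1 := by
  fun_induction stripA n p with
  | case1 n h r ih =>
    intro hn hp
    obtain ⟨h1, h2, h3⟩ := h
    have hdvd : p ∣ n := Nat.dvd_of_mod_eq_zero h3
    have hq : 1 ≤ n / p := (Nat.one_le_div_iff (by omega)).mpr (Nat.le_of_dvd (by omega) hdvd)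
    obtain ⟨e1, e2, e3⟩ := ih hq hp
    refine ⟨?_, e2, e3⟩
    show n = (stripA (n / p) p).1 * p ^ ((stripA (n / p) p).2 + 1)
    calc n = (n / p) * p := (Nat.div_mul_cancel hdvd).symm
      _ = ((stripA (n / p) p).1 * p ^ (stripA (n / p) p).2) * p := by rw [← e1]
      _ = (stripA (n / p) p).1 * p ^ ((stripA (n / p) p).2 + 1) := by ring
  | case2 n h =>
    intro hn hp
    refine ⟨by simp, ?_, hn⟩
    intro hdvd
    exact h ⟨hn, hp, Nat.mod_eq_zero_of_dvd hdvd⟩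

-- main invariant of A's outer loop: the running result is the squarefree part of out * n
theorem loopA_spec (n out p : Nat) : 0 < n → 2 ≤ p →
    (∀ q, q.Prime → q ∣ n → p ≤ q) → Squarefree out → (∀ q, q.Prime → q ∣ out → q < p) →
    Squarefree (loopA n out p) ∧ ∃ k, k ≠ 0 ∧ loopA n out p * k ^ 2 = out * n := by
  fun_induction loopA n out p with
  | case1 n out p h r ih =>
    intro hn hp hfac hout houtfac
    show Squarefree (loopA (stripA n p).1
        (if (stripA n p).2 % 2 = 1 then out * p else out) (p + 1)) ∧
      ∃ k, k ≠ 0 ∧ loopA (stripA n p).1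
        (if (stripA n p).2 % 2 = 1 then out * p else out) (p + 1) * k ^ 2 = out * n
    obtain ⟨e1, e2, e3⟩ := stripA_spec n p hn hp
    have hn'dvd : (stripA n p).1 ∣ n := ⟨p ^ (stripA n p).2, e1⟩
    have hfac' : ∀ q, q.Prime → q ∣ (stripA n p).1 → p + 1 ≤ q := by
      intro q hq hdq
      have hqn : q ∣ n := hdq.trans hn'dvd
      have := hfac q hq hqn
      rcases Nat.lt_or_ge p q with h' | h'
      · omega
      · have : q = p := by omega
        subst this
        exact absurd hdq e2
    have hprime : (stripA n p).2 % 2 = 1 → p.Prime := by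
      intro hpar
      have he1 : 1 ≤ (stripA n p).2 := by omega
      have hpn : p ∣ n := by
        rw [e1]
        exact Dvd.dvd.mul_left (dvd_pow_self p (by omega)) _
      have hmf : p.minFac.Prime := Nat.minFac_prime (by omega)
      have h5 := hfac p.minFac hmf ((Nat.minFac_dvd p).trans hpn)
      have h6 := Nat.minFac_le (show 0 < p by omega)
      have : p.minFac = p := by omega
      rw [← this]; exact hmf
    have hout' : Squarefree (if (stripA n p).2 % 2 = 1 then out * p else out) := by
      split
      · next hpar =>
        have hpp := hprime hpar
        have hnd : ¬ p ∣ out := fun hd => absurd (houtfac p hpp hd) (by omega)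
        exact (Nat.squarefree_mul ((hpp.coprime_iff_not_dvd.mpr hnd).symm)).mpr
          ⟨hout, hpp.squarefree⟩
      · exact hout
    have houtfac' : ∀ q, q.Prime → q ∣ (if (stripA n p).2 % 2 = 1 then out * p else out) →
        q < p + 1 := by
      intro q hq
      split
      · next hpar =>
        intro hdq
        rcases hq.dvd_mul.mp hdq with h' | h'
        · have := houtfac q hq h'; omega
        · have := (Nat.prime_dvd_prime_iff_eq hq (hprime hpar)).mp h'; omega
      · intro hdq; have := houtfac q hq hdq; omega
    obtain ⟨ihsf, k, hk, hke⟩ := ih e3 (by omega) hfac' hout' houtfac'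
    have ihsf2 : Squarefree (loopA (stripA n p).1
        (if (stripA n p).2 % 2 = 1 then out * p else out) (p + 1)) := ihsf
    have hke2 : loopA (stripA n p).1
        (if (stripA n p).2 % 2 = 1 then out * p else out) (p + 1) * k ^ 2 =
        (if (stripA n p).2 % 2 = 1 then out * p else out) * (stripA n p).1 := hke
    clear ihsf hke
    refine ⟨ihsf2, k * p ^ ((stripA n p).2 / 2),
      mul_ne_zero hk (pow_ne_zero _ (by omega)), ?_⟩
    have hsplit : p ^ ((stripA n p).2 / 2) * p ^ ((stripA n p).2 / 2) *
        p ^ ((stripA n p).2 % 2) = p ^ (stripA n p).2 := by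
      rw [← pow_add, ← pow_add]; congr 1; omega
    by_cases hpar : (stripA n p).2 % 2 = 1
    · rw [if_pos hpar] at hke2 ⊢
      calc loopA (stripA n p).1 (out * p) (p + 1) * (k * p ^ ((stripA n p).2 / 2)) ^ 2
          = (loopA (stripA n p).1 (out * p) (p + 1) * k ^ 2) *
            (p ^ ((stripA n p).2 / 2) * p ^ ((stripA n p).2 / 2)) := by ring
        _ = out * (stripA n p).1 * (p ^ ((stripA n p).2 / 2) * p ^ ((stripA n p).2 / 2) *
            p ^ ((stripA n p).2 % 2)) := by rw [hke2, hpar, pow_one]; ring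
        _ = out * (stripA n p).1 * p ^ (stripA n p).2 := by rw [hsplit]
        _ = out * n := by conv_rhs => rw [e1, ← mul_assoc]
    · rw [if_neg hpar] at hke2 ⊢
      have hpar0 : (stripA n p).2 % 2 = 0 := by omega
      calc loopA (stripA n p).1 out (p + 1) * (k * p ^ ((stripA n p).2 / 2)) ^ 2
          = (loopA (stripA n p).1 out (p + 1) * k ^ 2) *
            (p ^ ((stripA n p).2 / 2) * p ^ ((stripA n p).2 / 2)) := by ring
        _ = out * (stripA n p).1 * (p ^ ((stripA n p).2 / 2) * p ^ ((stripA n p).2 / 2) *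
            p ^ ((stripA n p).2 % 2)) := by rw [hke2, hpar0, pow_zero]; ring
        _ = out * (stripA n p).1 * p ^ (stripA n p).2 := by rw [hsplit]
        _ = out * n := by conv_rhs => rw [e1, ← mul_assoc]
  | case2 n out p h h1 =>
    intro hn hp hfac hout houtfac
    have hlt : n < p * p := by
      rcases Nat.lt_or_ge n (p * p) with h' | h'
      · exact h'
      · exact absurd ⟨hp, h'⟩ h
    -- n is prime: its least prime factor q satisfies p ≤ q, and a proper cofactor would
    -- force n ≥ p * p
    obtain ⟨q, hqdef⟩ : ∃ q, n.minFac = q := ⟨_, rfl⟩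
    have hqp : q.Prime := hqdef ▸ Nat.minFac_prime (by omega)
    have hq : q ∣ n := hqdef ▸ Nat.minFac_dvd n
    have hpq : p ≤ q := hfac q hqp hq
    obtain ⟨t, ht⟩ := hq
    have ht1 : t = 1 := by
      by_contra htne
      have ht0 : 0 < t := by
        rcases Nat.eq_zero_or_pos t with h' | h'
        · rw [h', mul_zero] at ht; omega
        · exact h'
      have ht2 : 1 < t := by omega
      obtain ⟨u, hudef⟩ : ∃ u, t.minFac = u := ⟨_, rfl⟩
      have htf : u.Prime := hudef ▸ Nat.minFac_prime (by omega)
      have hut : u ∣ t := hudef ▸ Nat.minFac_dvd t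
      have hpt := hfac u htf (by rw [ht]; exact Dvd.dvd.mul_left hut q)
      have hle : q * u ≤ n := by
        obtain ⟨s, hs⟩ := hut
        have : q * u ∣ n := ⟨s, by rw [ht, hs]; ring⟩
        exact Nat.le_of_dvd (by omega) this
      have : p * p ≤ q * u := Nat.mul_le_mul hpq hpt
      omega
    have hneq : n = q := by rw [ht, ht1, mul_one]
    have hnp : n.Prime := by rw [hneq]; exact hqp
    have hnd : ¬ n ∣ out := by
      intro hd
      have h7 := houtfac n hnp hd
      omega
    exact ⟨(Nat.squarefree_mul ((hnp.coprime_iff_not_dvd.mpr hnd).symm)).mpr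
      ⟨hout, hnp.squarefree⟩, 1, one_ne_zero, by ring⟩
  | case3 n out p h h1 =>
    intro hn hp hfac hout houtfac
    have : n = 1 := by omega
    exact ⟨hout, 1, one_ne_zero, by rw [this]; ring⟩

-- B's loop only ever divides by squares: its result times a square is the input
theorem bLoop_exists (m d : Nat) : ∃ k, k ≠ 0 ∧ bLoop m d * k ^ 2 = m := by
  fun_induction bLoop m d with
  | case1 m d h hdvd ih =>
    obtain ⟨k, hk, hke⟩ := ih
    refine ⟨k * d, mul_ne_zero hk (by omega), ?_⟩
    calc bLoop (m / (d * d)) d * (k * d) ^ 2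
        = (bLoop (m / (d * d)) d * k ^ 2) * (d * d) := by ring
      _ = (m / (d * d)) * (d * d) := by rw [hke]
      _ = m := Nat.div_mul_cancel (Nat.dvd_of_mod_eq_zero hdvd)
  | case2 m d h hdvd ih => exact ih
  | case3 m d h => exact ⟨1, one_ne_zero, by ring⟩

-- when B's loop stops, no square > 1 divides what is left
theorem bLoop_squarefree (m d : Nat) : 0 < m → 2 ≤ d →
    (∀ c, 2 ≤ c → c * c ∣ m → d ≤ c) → Squarefree (bLoop m d) := by
  fun_induction bLoop m d with
  | case1 m d h hdvd ih =>
    intro hm hd hsq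
    have hdm : d * d ∣ m := Nat.dvd_of_mod_eq_zero hdvd
    have hquot : m / (d * d) ∣ m := Nat.div_dvd_of_dvd hdm
    apply ih
    · have := Nat.le_of_dvd hm hdm
      exact (Nat.one_le_div_iff (by nlinarith)).mpr h.2
    · exact hd
    · intro c hc hcd
      exact hsq c hc (hcd.trans hquot)
  | case2 m d h hdvd ih =>
    intro hm hd hsq
    apply ih hm (by omega)
    intro c hc hcd
    have := hsq c hc hcd
    rcases Nat.eq_or_lt_of_le this with h' | h'
    · exact absurd (Nat.mod_eq_zero_of_dvd (h' ▸ hcd)) hdvd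
    · omega
  | case3 m d h =>
    intro hm hd hsq x hx
    rcases Nat.lt_or_ge x 2 with hx2 | hx2
    · interval_cases x
      · exact absurd (Nat.eq_zero_of_zero_dvd (by simpa using hx)) (by omega)
      · exact isUnit_one
    · exfalso
      have hdx := hsq x hx2 hx
      have hxx : x * x ≤ m := Nat.le_of_dvd hm hx
      have : d * d ≤ x * x := Nat.mul_le_mul hdx hdx
      have : m < d * d := by
        rcases Nat.lt_or_ge m (d * d) with h' | h'
        · exact h'
        · exact absurd ⟨hd, h'⟩ h
      omega

-- ===== VERDICT (by name: the statement is the Claim_ definition above) =====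
theorem squarefree_kernel_int_spec : Claim_equal_squarefree_kernel_int := by
  unfold Claim_equal_squarefree_kernel_int Spec_squarefree_kernel_int
  intro n _
  by_cases hz : n = 0
  · simp [squarefree_kernel_int, squarefree_kernel_int_alt, hz]
  · have hm : 0 < n.natAbs := Int.natAbs_pos.mpr hz
    obtain ⟨sfA, kA, hkA, hA⟩ := loopA_spec n.natAbs 1 2 hm (le_refl 2)
      (fun q hq _ => hq.two_le) squarefree_one
      (fun q hq hdq => by rw [Nat.dvd_one.mp hdq] at hq; exact absurd hq Nat.not_prime_one)
    obtain ⟨kB, hkB, hB⟩ := bLoop_exists n.natAbs 2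
    have sfB := bLoop_squarefree n.natAbs 2 hm le_rfl (fun c hc _ => hc)
    rw [one_mul] at hA
    have heq : loopA n.natAbs 1 2 = bLoop n.natAbs 2 :=
      sqf_unique sfA sfB (by rw [hA, hB]) hkA hkB
    simp [squarefree_kernel_int, squarefree_kernel_int_alt, hz, heq, Int.natAbs_eq_zero]
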